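-- pv_equiv track=rewrite | github.com/danchomas/university | 4sem/io/lab3/main.py | get_basic_variables
-- ===== SOURCE A (Python) =====
-- def get_basic_variables(matrix):
--     """Получение списка базисных переменных."""
--     basic_list = []
--     usage_rows = []
--     for col in range(len(matrix[0])):
--         count_one = sum(1 for row in matrix if row[col] == 1)
--         count_another = sum(1 for row in matrix if row[col] != 0 and row[col] != 1)
--         if count_one == 1 and count_another == 0:
--             one_index = next(i for i, row in enumerate(matrix) if row[col] == 1)
--             basic_list.append(col)
--             usage_rows.append(one_index)
--     return basic_list, usage_rows
-- ===== SOURCE B (Python) =====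
-- def get_basic_variables(matrix):
--     """Получение списка базисных переменных."""
--     n = len(matrix[0])
--     stats = [(0, 0, -1) for _ in range(n)]  # (ones, others, first-one row index or -1) per column
--     for i, row in enumerate(matrix):
--         for col in range(n):
--             v = row[col]
--             ones, other, first = stats[col]
--             if v == 1:
--                 stats[col] = (ones + 1, other, i if first == -1 else first)
--             elif v != 0:
--                 stats[col] = (ones, other + 1, first)
--     basic_list = []
--     usage_rows = []
--     for col in range(n):
--         ones, other, first = stats[col]
--         if ones == 1 and other == 0:
--             basic_list.append(col)
--             usage_rows.append(first)
--     return basic_list, usage_rows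
-- ===== Notes on version B (the rewrite author's own statement) =====
-- stated objective: alternative
-- what changed: Replaced A's per-column triple scans (two generator sums plus a next() search over all rows for every column) by a single row-major pass that maintains per-column accumulators (ones count, other-nonzero count, first-one row index), followed by one scan over the columns.
import Mathlib
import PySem

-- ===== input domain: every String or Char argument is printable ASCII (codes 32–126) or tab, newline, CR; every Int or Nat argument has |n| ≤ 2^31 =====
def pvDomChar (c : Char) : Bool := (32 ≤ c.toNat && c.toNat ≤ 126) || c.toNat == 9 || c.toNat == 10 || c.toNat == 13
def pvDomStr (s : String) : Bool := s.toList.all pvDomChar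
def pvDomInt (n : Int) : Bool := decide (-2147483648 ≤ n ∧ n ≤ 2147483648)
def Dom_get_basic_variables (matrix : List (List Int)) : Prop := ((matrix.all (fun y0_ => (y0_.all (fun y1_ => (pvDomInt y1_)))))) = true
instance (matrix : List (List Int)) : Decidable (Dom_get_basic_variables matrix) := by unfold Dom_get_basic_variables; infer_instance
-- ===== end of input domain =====

-- B replaces A's three per-column row scans (two counting sums and a first-match search
-- per column) by a single row-major pass maintaining per-column (ones, others, first-one-index)
-- accumulators, followed by one scan over the columns.


-- ===== PORT A =====
-- literal port of A: for each col in range(len(matrix[0])) count rows with row[col]==1,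
-- rows with row[col] not in {0,1}, and on (1,0) record the first row index with a 1
def get_basic_variables (matrix : List (List Int)) : List Int × List Int :=
  let n := (matrix.headD []).length
  (List.range n).foldl (fun (st : List Int × List Int) (col : Nat) =>
    let count_one := matrix.countP (fun row => PySem.List.pyGetD row (col : Int) 0 == 1)
    let count_another := matrix.countP (fun row =>
      PySem.List.pyGetD row (col : Int) 0 != 0 && PySem.List.pyGetD row (col : Int) 0 != 1)
    if count_one = 1 ∧ count_another = 0 then
      let one_index := matrix.findIdx (fun row => PySem.List.pyGetD row (col : Int) 0 == 1)
      (st.1 ++ [(col : Int)], st.2 ++ [(one_index : Int)])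
    else st) ([], [])

-- ===== PORT B =====
-- one row of B's single pass: update every column's (ones, others, first) accumulator
def gbvRow (n : Nat) (i : Int) (row : List Int) (stats : List (Int × Int × Int)) :
    List (Int × Int × Int) :=
  (List.range n).foldl (fun (a : List (Int × Int × Int)) (col : Nat) =>
    let v := PySem.List.pyGetD row (col : Int) 0
    let t := a.getD col (0, 0, -1)
    if v = 1 then a.set col (t.1 + 1, t.2.1, if t.2.2 = -1 then i else t.2.2)
    else if v ≠ 0 then a.set col (t.1, t.2.1 + 1, t.2.2)
    else a) stats

def get_basic_variables_alt (matrix : List (List Int)) : List Int × List Int :=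
  let n := (matrix.headD []).length
  let stats0 : List (Int × Int × Int) := (List.range n).map (fun _ => (0, 0, -1))
  let stats := (matrix.foldl (fun (p : Int × List (Int × Int × Int)) row =>
    (p.1 + 1, gbvRow n p.1 row p.2)) (0, stats0)).2
  (List.range n).foldl (fun (st : List Int × List Int) (col : Nat) =>
    let t := stats.getD col (0, 0, -1)
    if t.1 = 1 ∧ t.2.1 = 0 then (st.1 ++ [(col : Int)], st.2 ++ [t.2.2])
    else st) ([], [])

-- ===== PRECONDITION & SPEC =====
-- Pre_ excludes exactly the inputs where the Python A raises IndexError: the empty matrix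
-- (matrix[0]) and ragged matrices where some row is shorter than the first row (row[col]).
def Pre_get_basic_variables (matrix : List (List Int)) : Prop :=
  matrix ≠ [] ∧ ∀ row ∈ matrix, (matrix.headD []).length ≤ row.length
instance (matrix : List (List Int)) : Decidable (Pre_get_basic_variables matrix) := by
  unfold Pre_get_basic_variables; infer_instance

def pvWitness_get_basic_variables : List (List Int) := [[1, 0], [0, 1]]

def Spec_get_basic_variables (matrix : List (List Int)) (out : List Int × List Int) : Prop :=
  out = get_basic_variables_alt matrix
instance (matrix : List (List Int)) (out : List Int × List Int) :
    Decidable (Spec_get_basic_variables matrix out) := by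
  unfold Spec_get_basic_variables; infer_instance

-- ===== CLAIM (what is proved, stated in full; the proofs are below) =====
def Claim_equal_get_basic_variables : Prop := ∀ (matrix : List (List Int)),
  Dom_get_basic_variables matrix → Pre_get_basic_variables matrix →
  Spec_get_basic_variables matrix (get_basic_variables matrix)

-- ===== LEMMAS AND PROOFS =====

-- pointwise update of one accumulator by one row entry
def gbvUpd (i : Int) (row : List Int) (col : Nat) (t : Int × Int × Int) : Int × Int × Int :=
  let v := PySem.List.pyGetD row (col : Int) 0
  if v = 1 then (t.1 + 1, t.2.1, if t.2.2 = -1 then i else t.2.2)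
  else if v ≠ 0 then (t.1, t.2.1 + 1, t.2.2)
  else t

-- column statistics of the rows of `matrix`, the rows being numbered from `i`
def colStat (matrix : List (List Int)) (i : Int) (col : Nat) : Int × Int × Int :=
  match matrix with
  | [] => (0, 0, -1)
  | r :: m =>
    let s := colStat m (i + 1) col
    let v := PySem.List.pyGetD r (col : Int) 0
    if v = 1 then (s.1 + 1, s.2.1, i)
    else if v ≠ 0 then (s.1, s.2.1 + 1, s.2.2)
    else s

-- merging the statistics of two consecutive row blocks
def gbvComb (t s : Int × Int × Int) : Int × Int × Int :=
  (t.1 + s.1, t.2.1 + s.2.1, if t.2.2 = -1 then s.2.2 else t.2.2)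

-- an in-increasing-order fold of `set`s over all indices is a `mapIdx`
theorem foldl_range_set {α : Type} (g : Nat → α → α) (d : α) :
    ∀ (n : Nat) (l : List α),
      (List.range n).foldl (fun a col => a.set col (g col (a.getD col d))) l
        = l.mapIdx (fun c t => if c < n then g c t else t) := by
  intro n
  induction n with
  | zero =>
    intro l
    apply List.ext_getElem <;> simp [List.getElem_mapIdx]
  | succ n ih =>
    intro l
    rw [List.range_succ, List.foldl_append, ih]
    simp only [List.foldl_cons, List.foldl_nil]
    apply List.ext_getElem
    · simp
    intro c hc1 hc2
    have hlen : (l.mapIdx (fun c t => if c < n then g c t else t)).length = l.length := by simp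
    rw [List.getElem_set]
    by_cases hcn : n = c
    · subst hcn
      have hn : n < l.length := by simpa using hc1
      have hgd : (l.mapIdx (fun c t => if c < n then g c t else t)).getD n d = l[n] := by
        rw [List.getD_eq_getElem?_getD, List.getElem?_eq_getElem (hlen ▸ hn)]
        simp [List.getElem_mapIdx]
      rw [if_pos rfl, hgd]
      simp [List.getElem_mapIdx]
    · rw [if_neg hcn]
      simp only [List.getElem_mapIdx]
      by_cases h : c < n
      · simp [h, Nat.lt_succ_of_lt h]
      · have h2 : ¬ c < n + 1 := by omega
        simp [h, h2]

theorem gbvRow_eq_mapIdx (n : Nat) (i : Int) (row : List Int)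
    (stats : List (Int × Int × Int)) (h : stats.length = n) :
    gbvRow n i row stats = stats.mapIdx (fun col t => gbvUpd i row col t) := by
  have hfun : (fun (a : List (Int × Int × Int)) (col : Nat) =>
      let v := PySem.List.pyGetD row (col : Int) 0
      let t := a.getD col (0, 0, -1)
      if v = 1 then a.set col (t.1 + 1, t.2.1, if t.2.2 = -1 then i else t.2.2)
      else if v ≠ 0 then a.set col (t.1, t.2.1 + 1, t.2.2)
      else a)
      = (fun (a : List (Int × Int × Int)) (col : Nat) => a.set col (gbvUpd i row col (a.getD col (0, 0, -1)))) := by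
    funext a col
    simp only [gbvUpd]
    by_cases h1 : PySem.List.pyGetD row (col : Int) 0 = 1
    · simp only [if_pos h1]
    · simp only [if_neg h1]
      by_cases h2 : PySem.List.pyGetD row (col : Int) 0 ≠ 0
      · simp only [if_pos h2]
      · simp only [if_neg h2]
        by_cases hc : col < a.length
        · rw [List.getD_eq_getElem?_getD, List.getElem?_eq_getElem hc]
          exact (List.set_getElem_self hc).symm
        · exact (List.set_eq_of_length_le (by omega)).symm
  subst h
  unfold gbvRow
  rw [hfun, foldl_range_set]
  apply List.ext_getElem
  · simp
  · intro c h1 h2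
    simp only [List.getElem_mapIdx]
    simp only [List.length_mapIdx] at h1
    rw [if_pos h1]

theorem gbvComb_step (i0 : Int) (h : 0 ≤ i0) (r : List Int) (m : List (List Int)) (col : Nat)
    (t : Int × Int × Int) :
    gbvComb (gbvUpd i0 r col t) (colStat m (i0 + 1) col) = gbvComb t (colStat (r :: m) i0 col) := by
  obtain ⟨a, b, c⟩ := t
  simp only [gbvUpd, gbvComb, colStat]
  split_ifs <;> simp_all [Prod.ext_iff] <;> omega

-- B's row pass computes the per-column statistics of the whole matrix
theorem gbv_outer (n : Nat) :
    ∀ (m : List (List Int)) (i0 : Int) (stats : List (Int × Int × Int)),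
      stats.length = n → 0 ≤ i0 →
      (m.foldl (fun (p : Int × List (Int × Int × Int)) row =>
        (p.1 + 1, gbvRow n p.1 row p.2)) (i0, stats)).2
        = stats.mapIdx (fun col t => gbvComb t (colStat m i0 col)) := by
  intro m
  induction m with
  | nil =>
    intro i0 stats hl hi
    apply List.ext_getElem
    · simp
    · intro c h1 h2
      simp only [List.foldl_nil, List.getElem_mapIdx, colStat, gbvComb]
      split_ifs with h3 <;> simp [Prod.ext_iff, h3]
  | cons r m ih =>
    intro i0 stats hl hi
    simp only [List.foldl_cons]
    rw [ih (i0 + 1) (gbvRow n i0 r stats) (by rw [gbvRow_eq_mapIdx n i0 r stats hl]; simpa using hl) (by omega)]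
    rw [gbvRow_eq_mapIdx n i0 r stats hl, List.mapIdx_mapIdx]
    apply List.ext_getElem
    · simp
    · intro c h1 h2
      simp only [List.getElem_mapIdx]
      exact gbvComb_step i0 hi r m c _

theorem colStat_fst (col : Nat) : ∀ (m : List (List Int)) (i : Int),
    (colStat m i col).1
      = (m.countP (fun row => PySem.List.pyGetD row (col : Int) 0 == 1) : Int) := by
  intro m
  induction m with
  | nil => intro i; simp [colStat]
  | cons r m ih =>
    intro i
    simp only [colStat, List.countP_cons, PySem.List.pyGetD_natCast] at ih ⊢
    by_cases h1 : r.getD col (0 : Int) = 1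
    · rw [if_pos h1, if_pos (by simp only [beq_iff_eq]; exact h1 : (r.getD col (0 : Int) == 1) = true)]
      simp only [ih]; push_cast; ring
    · rw [if_neg h1, if_neg (by simp only [beq_iff_eq]; exact h1 : ¬ (r.getD col (0 : Int) == 1) = true)]
      by_cases h2 : r.getD col (0 : Int) ≠ 0
      · rw [if_pos h2]; simp [ih]
      · rw [if_neg h2]; simp [ih]

theorem colStat_snd (col : Nat) : ∀ (m : List (List Int)) (i : Int),
    (colStat m i col).2.1
      = (m.countP (fun row => PySem.List.pyGetD row (col : Int) 0 != 0
          && PySem.List.pyGetD row (col : Int) 0 != 1) : Int) := by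
  intro m
  induction m with
  | nil => intro i; simp [colStat]
  | cons r m ih =>
    intro i
    simp only [colStat, List.countP_cons, PySem.List.pyGetD_natCast] at ih ⊢
    by_cases h1 : r.getD col (0 : Int) = 1
    · rw [if_pos h1,
        if_neg (by simp only [Bool.and_eq_true, bne_iff_ne, ne_eq]; tauto : ¬ (r.getD col (0 : Int) != 0 && r.getD col (0 : Int) != 1) = true)]
      simp [ih]
    · rw [if_neg h1]
      by_cases h2 : r.getD col (0 : Int) ≠ 0
      · rw [if_pos h2,
          if_pos (by simp only [Bool.and_eq_true, bne_iff_ne, ne_eq]; exact ⟨h2, h1⟩ : (r.getD col (0 : Int) != 0 && r.getD col (0 : Int) != 1) = true)]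
        simp only [ih]; push_cast; ring
      · rw [if_neg h2,
          if_neg (by simp only [Bool.and_eq_true, bne_iff_ne, ne_eq]; tauto : ¬ (r.getD col (0 : Int) != 0 && r.getD col (0 : Int) != 1) = true)]
        simp [ih]

theorem colStat_thd (col : Nat) : ∀ (m : List (List Int)) (i : Int),
    (colStat m i col).2.2
      = (match m.findIdx? (fun row => PySem.List.pyGetD row (col : Int) 0 == 1) with
         | some j => i + (j : Int)
         | none => -1) := by
  intro m
  induction m with
  | nil => intro i; simp [colStat]
  | cons r m ih =>
    intro i
    simp only [colStat, List.findIdx?_cons, PySem.List.pyGetD_natCast] at ih ⊢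
    have hih := ih (i + 1)
    simp only [List.getD_eq_getElem?_getD] at hih
    by_cases h1 : r.getD col (0 : Int) = 1
    · rw [if_pos h1, if_pos (by simp only [beq_iff_eq]; exact h1 : (r.getD col (0 : Int) == 1) = true)]
      simp
    · rw [if_neg h1, if_neg (by simp only [beq_iff_eq]; exact h1 : ¬ (r.getD col (0 : Int) == 1) = true)]
      by_cases h2 : r.getD col (0 : Int) ≠ 0
      · rw [if_pos h2]
        cases hf : m.findIdx? (fun row => (row[(col : Nat)]?).getD (0 : Int) == 1) <;>
          simp [hf] at hih ⊢ <;> simp [hih] <;> ring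
      · rw [if_neg h2]
        cases hf : m.findIdx? (fun row => (row[(col : Nat)]?).getD (0 : Int) == 1) <;>
          simp [hf] at hih ⊢ <;> simp [hih] <;> ring

theorem foldl_ext_mem {α β : Type} (f g : β → α → β) (l : List α) (b0 : β)
    (h : ∀ x ∈ l, ∀ b, f b x = g b x) : l.foldl f b0 = l.foldl g b0 := by
  induction l generalizing b0 with
  | nil => rfl
  | cons a l ih =>
    simp only [List.foldl_cons]
    rw [h a (by simp)]
    exact ih _ (fun x hx b => h x (by simp [hx]) b)

-- the two ports agree on every input (the ports are total; Pre_ only mirrors where the Python raises)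
theorem gbv_main (matrix : List (List Int)) :
    get_basic_variables matrix = get_basic_variables_alt matrix := by
  unfold get_basic_variables get_basic_variables_alt
  simp only []
  have hstats := gbv_outer (matrix.headD []).length matrix 0
      ((List.range (matrix.headD []).length).map (fun _ => ((0 : Int), (0 : Int), (-1 : Int))))
      (by simp) (by omega)
  rw [hstats]
  apply foldl_ext_mem
  intro col hcol st
  have hc : col < (matrix.headD []).length := List.mem_range.mp hcol
  have hget : (((List.range (matrix.headD []).length).map
        (fun _ => ((0 : Int), (0 : Int), (-1 : Int)))).mapIdx
        (fun col t => gbvComb t (colStat matrix 0 col))).getD col (0, 0, -1)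
      = colStat matrix 0 col := by
    rw [List.getD_eq_getElem?_getD, List.getElem?_eq_getElem (by simpa using hc)]
    simp [List.getElem_mapIdx, gbvComb]
  rw [hget]
  rw [colStat_fst, colStat_snd, colStat_thd]
  by_cases hone : matrix.countP (fun row => PySem.List.pyGetD row (col : Int) 0 == 1) = 1
      ∧ matrix.countP (fun row => PySem.List.pyGetD row (col : Int) 0 != 0
          && PySem.List.pyGetD row (col : Int) 0 != 1) = 0
  · rw [if_pos hone, if_pos ⟨by exact_mod_cast hone.1, by exact_mod_cast hone.2⟩]
    have hex : ∃ x ∈ matrix, (PySem.List.pyGetD x (col : Int) 0 == 1) = true :=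
      List.countP_pos_iff.mp (by omega)
    cases ho : matrix.findIdx? (fun row => PySem.List.pyGetD row (col : Int) 0 == 1) with
    | none =>
      exfalso
      rw [List.findIdx?_eq_none_iff] at ho
      obtain ⟨x, hx, hpx⟩ := hex
      exact absurd hpx (by simpa using ho x hx)
    | some j =>
      rw [List.findIdx_eq_getD_findIdx?, ho]
      simp
  · rw [if_neg hone, if_neg (by
      intro h
      exact hone ⟨by exact_mod_cast h.1, by exact_mod_cast h.2⟩)]

-- ===== VERDICT (by name: the statement is the Claim_ definition above) =====
theorem get_basic_variables_spec : Claim_equal_get_basic_variables := by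
  intro matrix _ _
  unfold Spec_get_basic_variables
  exact gbv_main matrix
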